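-- pv_equiv track=rewrite | github.com/jwhittenpk/Sidecar | app.py | rebalance_overlay_after_remove_multiple
-- ===== SOURCE A (Python) =====
-- import copy
--
-- COLUMN_VISIBILITY_KEY = "column_visibility"  # legacy; migrated to column_preferences
--
-- COLUMN_PREFERENCES_KEY = "column_preferences"
--
-- def _overlay_key(issue_id):
--     """Normalize issue_id for overlay key (e.g. LIN-123 or UUID). Use as-is if it looks like identifier."""
--     s = (issue_id or "").strip()
--     if not s:
--         return None
--     # If it's already an identifier (e.g. LIN-123), use it; otherwise Linear UUID is valid key too.
--     return s
--
-- def rebalance_overlay_after_remove_multiple(overlay, issue_ids):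
--     """Pure: remove personal_priority for each issue_id in issue_ids and rebalance so list stays contiguous.
--     Removes in ascending order of current priority so decrements are correct. Returns a new overlay dict."""
--     keys = [_overlay_key(i) for i in issue_ids]
--     keys = [k for k in keys if k and k in overlay]
--     if not keys:
--         return copy.deepcopy(overlay)
--     # Sort by current priority (ascending) so we remove from bottom up and don't shift wrong
--     with_priority = [(k, overlay[k].get("personal_priority")) for k in keys if overlay[k].get("personal_priority") is not None]
--     with_priority.sort(key=lambda x: (x[1] or 0))
--     out = copy.deepcopy(overlay)
--     for k, _ in with_priority:
--         removed = out.get(k, {}).get("personal_priority")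
--         if removed is None:
--             continue
--         out[k] = {kk: vv for kk, vv in out[k].items() if kk != "personal_priority"}
--         for kk in out:
--             if kk in (COLUMN_VISIBILITY_KEY, COLUMN_PREFERENCES_KEY):
--                 continue
--             p = out[kk].get("personal_priority")
--             if p is not None and p > removed:
--                 out[kk] = {**out[kk], "personal_priority": p - 1}
--     return out
-- ===== SOURCE B (Python) =====
-- from bisect import bisect_left
--
-- COLUMN_VISIBILITY_KEY = "column_visibility"
-- COLUMN_PREFERENCES_KEY = "column_preferences"
--
--
-- def rebalance_overlay_after_remove_multiple(overlay, issue_ids):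
--     """Single pass: collect the targeted keys once, sort their removed priorities,
--     then rewrite each entry directly (new priority = p - bisect_left(removed, p))."""
--     targets = set()
--     for i in issue_ids:
--         k = (i or "").strip()
--         if k and k in overlay:
--             targets.add(k)
--     removed = sorted(overlay[k]["personal_priority"] for k in targets
--                      if "personal_priority" in overlay[k])
--     out = {}
--     for k, d in overlay.items():
--         if k in targets:
--             out[k] = {kk: vv for kk, vv in d.items() if kk != "personal_priority"}
--         elif k in (COLUMN_VISIBILITY_KEY, COLUMN_PREFERENCES_KEY) or "personal_priority" not in d:
--             out[k] = dict(d)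
--         else:
--             p = d["personal_priority"]
--             out[k] = {**d, "personal_priority": p - bisect_left(removed, p)}
--     return out
-- ===== Notes on version B (the rewrite author's own statement) =====
-- stated objective: faster
-- what changed: A removes targets one by one, rebuilding and decrementing the whole overlay once per removal (R passes over all N entries); B collects the targeted keys once, sorts their removed priorities, and rewrites each entry in a single pass, subtracting bisect_left(removed, p) from each remaining priority.
import Mathlib
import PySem

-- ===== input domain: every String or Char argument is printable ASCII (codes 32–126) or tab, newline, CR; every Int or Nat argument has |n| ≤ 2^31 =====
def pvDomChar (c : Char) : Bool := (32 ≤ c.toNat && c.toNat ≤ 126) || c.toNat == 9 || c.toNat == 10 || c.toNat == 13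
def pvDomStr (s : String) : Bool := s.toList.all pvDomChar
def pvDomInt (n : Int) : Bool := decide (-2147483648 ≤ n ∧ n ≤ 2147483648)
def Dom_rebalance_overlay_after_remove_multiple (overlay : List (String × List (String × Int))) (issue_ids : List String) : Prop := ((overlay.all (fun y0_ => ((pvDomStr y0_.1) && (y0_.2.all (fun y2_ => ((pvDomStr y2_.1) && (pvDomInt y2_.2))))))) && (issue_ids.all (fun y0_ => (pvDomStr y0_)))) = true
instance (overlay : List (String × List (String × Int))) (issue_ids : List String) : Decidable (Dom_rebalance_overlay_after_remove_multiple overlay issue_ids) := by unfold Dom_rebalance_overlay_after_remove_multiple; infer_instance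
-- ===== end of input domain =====

-- B replaces A's remove-one-rebalance-all cascade (one full rewrite of the overlay per removal)
-- by a single pass that subtracts, from each remaining priority, the number of removed priorities
-- below it (bisect_left on the once-sorted removed priorities); objective: faster (one pass instead
-- of one pass per removal).
-- Pre_ excludes association lists with duplicate keys (unrepresentable as Python dicts), inputs
-- whose targeted removals carry duplicate priority values, and inputs that target the reserved
-- config keys as issue ids: on those tie/reserved-key corners A's cascading result is an accident
-- of removal order and neither behaviour is specified.


-- shared constants of the module
def pvPP : String := "personal_priority"
def pvCV : String := "column_visibility"
def pvCP : String := "column_preferences"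

-- _overlay_key: strip; empty → None, else the stripped string
def pvOverlayKey (issue_id : String) : Option String :=
  let s := PySem.Str.strip issue_id
  if s = "" then none else some s

-- the assoc-list arguments, viewed as the Python dicts they stand for
def pvToDict (overlay : List (String × List (String × Int))) : PySem.Dict String (PySem.Dict String Int) :=
  PySem.Dict.mk (overlay.map (fun e => (e.1, PySem.Dict.mk e.2)))
def pvOfDict (d : PySem.Dict String (PySem.Dict String Int)) : List (String × List (String × Int)) :=
  d.items.map (fun e => (e.1, e.2.items))

-- ===== PORT A =====
-- body of A's inner 'for kk in out:' loop
def pvInnerA (removed : Int) (o : PySem.Dict String (PySem.Dict String Int)) (kk : String) : PySem.Dict String (PySem.Dict String Int) :=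
  if kk = pvCV ∨ kk = pvCP then o
  else
    match ((o.get? kk).getD (PySem.Dict.mk [])).get? pvPP with
    | none => o
    | some p => if p > removed then o.insert kk (((o.get? kk).getD (PySem.Dict.mk [])).insert pvPP (p - 1)) else o

-- body of A's 'for k, _ in with_priority:' loop
def pvStepA (out : PySem.Dict String (PySem.Dict String Int)) (kp : String × Int) : PySem.Dict String (PySem.Dict String Int) :=
  match ((out.get? kp.1).getD (PySem.Dict.mk [])).get? pvPP with
  | none => out
  | some removed =>
      let out1 := out.insert kp.1 (PySem.Dict.mk (((out.get? kp.1).getD (PySem.Dict.mk [])).items.filter (fun x => x.1 ≠ pvPP)))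
      out1.keys.foldl (pvInnerA removed) out1

def rebalance_overlay_after_remove_multiple (overlay : List (String × List (String × Int))) (issue_ids : List String) : List (String × List (String × Int)) :=
  let ov := pvToDict overlay
  let keys0 := issue_ids.map pvOverlayKey
  let keys := keys0.filter (fun k => match k with
    | none => false
    | some s => !(s == "") && ov.contains s)
  if keys = [] then pvOfDict ov
  else
    let wp0 := keys.filterMap (fun k => match k with
      | none => none
      | some s => (((ov.get? s).getD (PySem.Dict.mk [])).get? pvPP).map (fun p => (s, p)))
    let wp := PySem.List.sorted wp0 (fun x => if x.2 = 0 then 0 else x.2)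
    pvOfDict (wp.foldl pvStepA ov)

-- ===== PORT B =====
-- bisect_left on a sorted list of ints = number of elements < p (exact for sorted input)
def pvCountLt (xs : List Int) (p : Int) : Int := ((xs.filter (fun v => v < p)).length : Int)

def rebalance_overlay_after_remove_multiple_alt (overlay : List (String × List (String × Int))) (issue_ids : List String) : List (String × List (String × Int)) :=
  let ov := pvToDict overlay
  let targets : PySem.Set String := issue_ids.foldl (fun t i =>
      let k := PySem.Str.strip i
      if !(k == "") && ov.contains k then PySem.Set.add t k else t) PySem.Set.empty
  let removed := PySem.List.sorted (targets.filterMap (fun k => ((ov.get? k).getD (PySem.Dict.mk [])).get? pvPP)) (fun v => v)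
  -- the dict built over overlay.items() (fresh unique keys, in order) is the pointwise map
  overlay.map (fun e =>
    if PySem.Set.contains targets e.1 then (e.1, e.2.filter (fun x => x.1 ≠ pvPP))
    else if e.1 = pvCV ∨ e.1 = pvCP then e
    else match (PySem.Dict.mk e.2).get? pvPP with
      | none => e
      | some p => (e.1, ((PySem.Dict.mk e.2).insert pvPP (p - pvCountLt removed p)).items))

-- ===== PRECONDITION & SPEC =====
-- the distinct normalized issue ids that hit the overlay, in first-occurrence order
def pvTargetList (overlay : List (String × List (String × Int))) (issue_ids : List String) : List String :=
  PySem.List.dedup ((issue_ids.map PySem.Str.strip).filter (fun k => !(k == "") && (overlay.map (fun e => e.1)).contains k))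
-- the personal_priority values those targets carry
def pvRemovedVals (overlay : List (String × List (String × Int))) (issue_ids : List String) : List Int :=
  (pvTargetList overlay issue_ids).filterMap (fun k =>
    ((List.find? (fun e => e.1 == k) overlay).map (fun e => e.2)).bind
      (fun d => (List.find? (fun x => x.1 == pvPP) d).map (fun x => x.2)))

-- Pre_ excludes (i) assoc lists with duplicate keys (no Python dict yields them), (ii) inputs whose
-- removed personal_priority values are not pairwise distinct, and (iii) inputs targeting the config
-- keys "column_visibility"/"column_preferences" as issue ids: on (ii)/(iii) A's cascade result is an
-- order-of-removal accident no caller would specify either way.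
def Pre_rebalance_overlay_after_remove_multiple (overlay : List (String × List (String × Int))) (issue_ids : List String) : Prop :=
  (overlay.map (fun e => e.1)).Nodup ∧
  (∀ e ∈ overlay, (e.2.map (fun x => x.1)).Nodup) ∧
  pvCV ∉ pvTargetList overlay issue_ids ∧
  pvCP ∉ pvTargetList overlay issue_ids ∧
  (pvRemovedVals overlay issue_ids).Nodup
instance (overlay : List (String × List (String × Int))) (issue_ids : List String) : Decidable (Pre_rebalance_overlay_after_remove_multiple overlay issue_ids) := by unfold Pre_rebalance_overlay_after_remove_multiple; infer_instance

def pvWitness_rebalance_overlay_after_remove_multiple : (List (String × List (String × Int))) × List String :=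
  ([("a", [("personal_priority", 1)]), ("b", [("personal_priority", 2), ("other", 7)]), ("c", [])], ["a", " b ", "zz", ""])

def Spec_rebalance_overlay_after_remove_multiple (overlay : List (String × List (String × Int))) (issue_ids : List String) (out : List (String × List (String × Int))) : Prop := out = rebalance_overlay_after_remove_multiple_alt overlay issue_ids
instance (overlay : List (String × List (String × Int))) (issue_ids : List String) (out : List (String × List (String × Int))) : Decidable (Spec_rebalance_overlay_after_remove_multiple overlay issue_ids out) := by unfold Spec_rebalance_overlay_after_remove_multiple; infer_instance

-- ===== CLAIM (what is proved, stated in full; the proofs are below) =====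
def Claim_equal_rebalance_overlay_after_remove_multiple : Prop := ∀ (overlay : List (String × List (String × Int))) (issue_ids : List String), Dom_rebalance_overlay_after_remove_multiple overlay issue_ids → Pre_rebalance_overlay_after_remove_multiple overlay issue_ids → Spec_rebalance_overlay_after_remove_multiple overlay issue_ids (rebalance_overlay_after_remove_multiple overlay issue_ids)

-- ===== LEMMAS AND PROOFS =====

theorem pv_witness_ok : Dom_rebalance_overlay_after_remove_multiple (pvWitness_rebalance_overlay_after_remove_multiple.1) (pvWitness_rebalance_overlay_after_remove_multiple.2) ∧ Pre_rebalance_overlay_after_remove_multiple (pvWitness_rebalance_overlay_after_remove_multiple.1) (pvWitness_rebalance_overlay_after_remove_multiple.2) := by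
  constructor <;> decide


-- ---- proof-only machinery ----

-- number of already-removed original priorities strictly below q
def pvCnt (done : List (String × Int)) (q : Int) : Int := ((done.filter (fun y => y.2 < q)).length : Int)

-- per-entry state of A's overlay after removing the pairs in `done` (key, original priority)
def pvE (done : List (String × Int)) (k : String) (d : List (String × Int)) : PySem.Dict String Int :=
  if k ∈ done.map (fun y => y.1) then PySem.Dict.mk (d.filter (fun x => x.1 ≠ pvPP))
  else if k = pvCV ∨ k = pvCP then PySem.Dict.mk d
  else match (PySem.Dict.mk d).get? pvPP with
    | none => PySem.Dict.mk d
    | some p => (PySem.Dict.mk d).insert pvPP (p - pvCnt done p)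

def pvRender (l : List (String × List (String × Int))) (done : List (String × Int)) : PySem.Dict String (PySem.Dict String Int) :=
  PySem.Dict.mk (l.map (fun e => (e.1, pvE done e.1 e.2)))

def pvAccum (done : List (String × Int)) (wp : List (String × Int)) : List (String × Int) :=
  wp.foldl (fun dn x => if x.1 ∈ dn.map (fun y => y.1) then dn else dn ++ [x]) done

-- normalized value of A's inner-loop body on the entry of key kk
def pvU (removed : Int) (kk : String) (dv : PySem.Dict String Int) : PySem.Dict String Int :=
  if kk = pvCV ∨ kk = pvCP then dv
  else match dv.get? pvPP with
    | none => dv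
    | some p => if p > removed then dv.insert pvPP (p - 1) else dv

-- ---- small dictionary lemmas ----

theorem pv_get?_mk {ν : Type} (l : List (String × ν)) (k : String) :
    (PySem.Dict.mk l).get? k = (List.find? (fun e => e.1 == k) l).map (fun e => e.2) := rfl

theorem pv_find?_map_fst {β ν : Type} (l : List (String × β)) (F : String → β → ν) (k : String) :
    List.find? (fun e => e.1 == k) (l.map (fun e => (e.1, F e.1 e.2))) =
    (List.find? (fun e => e.1 == k) l).map (fun e => (e.1, F e.1 e.2)) := by
  induction l with
  | nil => rfl
  | cons e t ih =>
    by_cases h : e.1 = k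
    · simp [List.find?, h]
    · simp only [List.map_cons, List.find?]
      have hb : (e.1 == k) = false := by simp [h]
      simp [hb, ih]

theorem pv_get?_render (l : List (String × List (String × Int))) (done : List (String × Int)) (k : String) :
    (pvRender l done).get? k = (List.find? (fun e => e.1 == k) l).map (fun e => pvE done e.1 e.2) := by
  rw [pvRender, pv_get?_mk, List.find?_map]
  have hp : ((fun e : String × PySem.Dict String Int => e.1 == k) ∘
      (fun e : String × List (String × Int) => (e.1, pvE done e.1 e.2))) = (fun e => e.1 == k) := rfl
  rw [hp, Option.map_map]
  rfl

theorem pv_contains_mk {ν : Type} (l : List (String × ν)) (k : String) :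
    (PySem.Dict.mk l).contains k = l.any (fun e => e.1 == k) := rfl

theorem pv_find?_none_of_not_mem {ν : Type} (l : List (String × ν)) (k : String)
    (h : k ∉ l.map (fun y => y.1)) : List.find? (fun e => e.1 == k) l = none := by
  apply List.find?_eq_none.2
  intro x hx
  simp only [beq_iff_eq]
  intro he
  exact h (by simpa [he] using List.mem_map_of_mem (f := fun y : String × ν => y.1) hx)

theorem pv_get?_mk_filter_pp (d : List (String × Int)) :
    (PySem.Dict.mk (d.filter (fun x => x.1 ≠ pvPP))).get? pvPP = none := by
  rw [pv_get?_mk]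
  have : List.find? (fun e => e.1 == pvPP) (d.filter (fun x => x.1 ≠ pvPP)) = none := by
    apply List.find?_eq_none.2
    intro x hx
    have := (List.mem_filter.1 hx).2
    simpa using of_decide_eq_true this
  rw [this]
  rfl

theorem pv_items_insert_pos {ν : Type} (items : List (String × ν)) (k : String) (v : ν)
    (hc : (PySem.Dict.mk items).contains k = true) :
    ((PySem.Dict.mk items).insert k v).items = items.map (fun p => if (p.1 == k) = true then (k, v) else p) := by
  rw [PySem.Dict.insert, if_pos hc]

theorem pv_items_insert_neg {ν : Type} (items : List (String × ν)) (k : String) (v : ν)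
    (hc : ¬ (PySem.Dict.mk items).contains k = true) :
    ((PySem.Dict.mk items).insert k v).items = items ++ [(k, v)] := by
  rw [PySem.Dict.insert, if_neg hc]

theorem pv_contains_of_get? {ν : Type} (d : PySem.Dict String ν) (k : String) (v : ν)
    (h : d.get? k = some v) : d.contains k = true := by
  cases d with
  | mk items =>
    rw [pv_get?_mk] at h
    cases hf : List.find? (fun e => e.1 == k) items with
    | none => rw [hf] at h; simp at h
    | some w =>
      rw [pv_contains_mk]
      exact List.any_eq_true.2 ⟨w, List.mem_of_find?_eq_some hf, by simpa using List.find?_some hf⟩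

theorem pv_map_rep_eq_self {ν : Type} (t : List (String × ν)) (k : String) (v : ν)
    (h : ∀ x ∈ t, (x.1 == k) = false) :
    t.map (fun p => if (p.1 == k) = true then (k, v) else p) = t := by
  induction t with
  | nil => rfl
  | cons e s ih =>
    have he := h e (by simp)
    rw [List.map_cons, if_neg (by simp [he] : ¬ ((e.1 == k) = true)),
      ih (fun x hx => h x (List.mem_cons_of_mem _ hx))]

theorem pv_insert_mk_self (d : List (String × Int)) (v : Int)
    (hnd : (d.map (fun x => x.1)).Nodup)
    (h : (PySem.Dict.mk d).get? pvPP = some v) :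
    (PySem.Dict.mk d).insert pvPP v = PySem.Dict.mk d := by
  have hc := pv_contains_of_get? _ _ _ h
  apply PySem.Dict.ext
  rw [pv_items_insert_pos _ _ _ hc]
  rw [pv_get?_mk] at h
  show _ = d
  induction d with
  | nil => simp at h
  | cons e t ih =>
    simp only [List.map_cons, List.nodup_cons] at hnd
    by_cases he : e.1 = pvPP
    · have hb : (e.1 == pvPP) = true := by simp [he]
      rw [List.find?_cons_of_pos (p := fun x : String × Int => x.1 == pvPP) hb] at h
      have hv : e.2 = v := by simpa using h
      have ht := pv_map_rep_eq_self t pvPP v (fun x hx => by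
        simp only [beq_eq_false_iff_ne, ne_eq]
        intro hxe
        exact hnd.1 (by rw [he]; simpa [hxe] using List.mem_map_of_mem (f := fun y : String × Int => y.1) hx))
      have hhead : ((pvPP, v) : String × Int) = e := by rw [← he, ← hv]
      rw [List.map_cons, if_pos hb, ht, hhead]
    · have hb : (e.1 == pvPP) = false := by simp [he]
      rw [List.find?_cons_of_neg (p := fun x : String × Int => x.1 == pvPP) (by simp [hb])] at h
      have ih' := ih hnd.2 h (pv_contains_of_get? (PySem.Dict.mk t) pvPP v (by rw [pv_get?_mk]; exact h))
      rw [List.map_cons, if_neg (by simp [hb] : ¬ ((e.1 == pvPP) = true)), ih']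

theorem pv_contains_insert_self {ν : Type} (d : PySem.Dict String ν) (k : String) (v : ν) :
    (d.insert k v).contains k = true := by
  cases d with
  | mk items =>
    by_cases hc : (PySem.Dict.mk items).contains k = true
    · rw [pv_contains_mk] at hc
      rcases List.any_eq_true.1 hc with ⟨w, hw, hwk⟩
      rw [pv_contains_mk, pv_items_insert_pos _ _ _ (by rw [pv_contains_mk]; exact List.any_eq_true.2 ⟨w, hw, hwk⟩)]
      exact List.any_eq_true.2 ⟨(k, v), List.mem_map.2 ⟨w, hw, by simp [hwk]⟩, by simp⟩
    · rw [pv_contains_mk, pv_items_insert_neg _ _ _ hc]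
      exact List.any_eq_true.2 ⟨(k, v), List.mem_append_right _ (by simp), by simp⟩

theorem pv_insert_insert_same {ν : Type} (d : PySem.Dict String ν) (k : String) (a b : ν) :
    (d.insert k a).insert k b = d.insert k b := by
  cases d with
  | mk items =>
    apply PySem.Dict.ext
    have h1 : ((PySem.Dict.mk items).insert k a).contains k = true := pv_contains_insert_self _ _ _
    obtain ⟨ia, hia⟩ : ∃ ia, (PySem.Dict.mk items).insert k a = PySem.Dict.mk ia := ⟨_, rfl⟩
    rw [hia] at h1 ⊢
    rw [pv_items_insert_pos _ _ _ h1]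
    by_cases hc : (PySem.Dict.mk items).contains k = true
    · rw [pv_items_insert_pos _ _ _ hc]
      have : ia = items.map (fun p => if (p.1 == k) = true then (k, a) else p) := by
        have := congrArg PySem.Dict.items hia
        rw [pv_items_insert_pos _ _ _ hc] at this
        exact this.symm
      rw [this, List.map_map]
      apply List.map_congr_left
      intro x hx
      by_cases hxk : (x.1 == k) = true <;> simp [hxk, Function.comp]
    · rw [pv_items_insert_neg _ _ _ hc]
      have : ia = items ++ [(k, a)] := by
        have := congrArg PySem.Dict.items hia
        rw [pv_items_insert_neg _ _ _ hc] at this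
        exact this.symm
      rw [this, List.map_append]
      have hmap := pv_map_rep_eq_self items k b (fun x hx => by
        by_contra hxx
        have hxx' : (x.1 == k) = true := by simpa using hxx
        exact hc (by rw [pv_contains_mk]; exact List.any_eq_true.2 ⟨x, hx, hxx'⟩))
      rw [hmap]
      simp

theorem pv_filter_rep (d : List (String × Int)) (v : Int) :
    (d.map (fun p => if (p.1 == pvPP) = true then (pvPP, v) else p)).filter (fun x => x.1 ≠ pvPP) =
      d.filter (fun x => x.1 ≠ pvPP) := by
  induction d with
  | nil => rfl
  | cons e t ih =>
    by_cases he : e.1 = pvPP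
    · rw [List.map_cons, if_pos (show (e.1 == pvPP) = true by simp [he]),
        List.filter_cons, List.filter_cons, if_neg (by simp), if_neg (by simp [he])]
      exact ih
    · rw [List.map_cons, if_neg (show ¬ (e.1 == pvPP) = true by simp [he]),
        List.filter_cons, List.filter_cons, if_pos (by simp [he]), if_pos (by simp [he])]
      rw [ih]

theorem pv_filter_items_insert (d : List (String × Int)) (v : Int) :
    ((PySem.Dict.mk d).insert pvPP v).items.filter (fun x => x.1 ≠ pvPP) = d.filter (fun x => x.1 ≠ pvPP) := by
  by_cases hc : (PySem.Dict.mk d).contains pvPP = true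
  · rw [pv_items_insert_pos _ _ _ hc]
    exact pv_filter_rep d v
  · rw [pv_items_insert_neg _ _ _ hc, List.filter_append]
    simp

theorem pv_get?_insert_self {ν : Type} (d : PySem.Dict String ν) (k : String) (v : ν) :
    (d.insert k v).get? k = some v := by
  cases d with
  | mk items =>
    by_cases hc : (PySem.Dict.mk items).contains k = true
    · obtain ⟨ia, hia⟩ : ∃ ia, (PySem.Dict.mk items).insert k v = PySem.Dict.mk ia := ⟨_, rfl⟩
      have hitems : items.map (fun p => if (p.1 == k) = true then (k, v) else p) = ia := by
        have h2 := congrArg PySem.Dict.items hia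
        rw [pv_items_insert_pos _ _ _ hc] at h2
        exact h2
      rw [hia, pv_get?_mk, ← hitems]
      rw [pv_contains_mk] at hc
      rcases List.any_eq_true.1 hc with ⟨w, hw, hwk⟩
      clear hia hitems hc
      induction items with
      | nil => simp at hw
      | cons e t ih =>
        by_cases he : (e.1 == k) = true
        · rw [List.map_cons, if_pos he, List.find?_cons_of_pos (p := fun x : String × ν => x.1 == k) (by simp)]
          rfl
        · have he' : (e.1 == k) = false := by simpa using he
          rcases List.mem_cons.1 hw with rfl | hw'
          · rw [hwk] at he'; simp at he'
          · rw [List.map_cons, if_neg he, List.find?_cons_of_neg (p := fun x : String × ν => x.1 == k) (by simp [he'])]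
            exact ih hw'
    · rw [PySem.Dict.insert, if_neg hc]
      rw [pv_get?_mk, List.find?_append]
      rw [pv_contains_mk] at hc
      have : List.find? (fun e => e.1 == k) items = none := by
        apply List.find?_eq_none.2
        intro x hx
        by_contra hxx
        exact hc (List.any_eq_true.2 ⟨x, hx, by simpa using hxx⟩)
      simp [this]

theorem pv_insert_mk_middle {ν : Type} (pref s : List (String × ν)) (e : String × ν) (v : ν)
    (h1 : e.1 ∉ pref.map (fun y => y.1)) (h2 : e.1 ∉ s.map (fun y => y.1)) :
    (PySem.Dict.mk (pref ++ e :: s)).insert e.1 v = PySem.Dict.mk (pref ++ (e.1, v) :: s) := by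
  have hc : (PySem.Dict.mk (pref ++ e :: s)).contains e.1 = true := by
    rw [pv_contains_mk]
    exact List.any_eq_true.2 ⟨e, List.mem_append_right _ (by simp), by simp⟩
  apply PySem.Dict.ext
  rw [pv_items_insert_pos _ _ _ hc]
  show (pref ++ e :: s).map _ = _
  rw [List.map_append, List.map_cons, if_pos (by simp)]
  rw [pv_map_rep_eq_self pref e.1 v (fun x hx => by
    simp only [beq_eq_false_iff_ne, ne_eq]
    intro hxe
    exact h1 (by simpa [hxe] using List.mem_map_of_mem (f := fun y : String × ν => y.1) hx)),
   pv_map_rep_eq_self s e.1 v (fun x hx => by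
    simp only [beq_eq_false_iff_ne, ne_eq]
    intro hxe
    exact h2 (by simpa [hxe] using List.mem_map_of_mem (f := fun y : String × ν => y.1) hx))]

theorem pv_get?_mk_middle {ν : Type} (pref s : List (String × ν)) (e : String × ν)
    (h1 : e.1 ∉ pref.map (fun y => y.1)) :
    (PySem.Dict.mk (pref ++ e :: s)).get? e.1 = some e.2 := by
  rw [pv_get?_mk, List.find?_append, pv_find?_none_of_not_mem _ _ h1,
    List.find?_cons_of_pos (p := fun x : String × ν => x.1 == e.1) (by simp)]
  rfl

theorem pv_inner_fold (removed : Int) :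
    ∀ (suff pref : List (String × PySem.Dict String Int)),
    ((pref ++ suff).map (fun e => e.1)).Nodup →
    List.foldl (pvInnerA removed) (PySem.Dict.mk (pref ++ suff)) (suff.map (fun e => e.1)) =
    PySem.Dict.mk (pref ++ suff.map (fun e => (e.1, pvU removed e.1 e.2))) := by
  intro suff
  induction suff with
  | nil => intro pref _; simp
  | cons e s ih =>
    intro pref hnd
    have hnd' := hnd
    rw [List.map_append, List.nodup_append] at hnd'
    have hpref : e.1 ∉ pref.map (fun y => y.1) := fun hmem =>
      hnd'.2.2 e.1 hmem e.1 (by simp) rfl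
    have hs : e.1 ∉ s.map (fun y => y.1) := by
      have := hnd'.2.1
      simp only [List.map_cons, List.nodup_cons] at this
      exact this.1
    have hget : (PySem.Dict.mk (pref ++ e :: s)).get? e.1 = some e.2 :=
      pv_get?_mk_middle pref s e hpref
    have hstep : pvInnerA removed (PySem.Dict.mk (pref ++ e :: s)) e.1 =
        PySem.Dict.mk (pref ++ (e.1, pvU removed e.1 e.2) :: s) := by
      rw [pvInnerA, pvU]
      by_cases hcfg : e.1 = pvCV ∨ e.1 = pvCP
      · rw [if_pos hcfg, if_pos hcfg]
      · rw [if_neg hcfg, if_neg hcfg, hget]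
        simp only [Option.getD_some]
        cases hp : e.2.get? pvPP with
        | none => rfl
        | some p =>
          show (if p > removed then (PySem.Dict.mk (pref ++ e :: s)).insert e.1 (e.2.insert pvPP (p - 1))
                else PySem.Dict.mk (pref ++ e :: s)) =
              PySem.Dict.mk (pref ++ (e.1, if p > removed then e.2.insert pvPP (p - 1) else e.2) :: s)
          by_cases hr : p > removed
          · rw [if_pos hr, if_pos hr]
            exact pv_insert_mk_middle pref s e _ hpref hs
          · rw [if_neg hr, if_neg hr]
    rw [List.map_cons, List.foldl_cons, hstep]
    have hrw : pref ++ (e.1, pvU removed e.1 e.2) :: s = (pref ++ [(e.1, pvU removed e.1 e.2)]) ++ s := by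
      simp
    have hnd2 : (((pref ++ [(e.1, pvU removed e.1 e.2)]) ++ s).map (fun e => e.1)).Nodup := by
      have : ((pref ++ [(e.1, pvU removed e.1 e.2)]) ++ s).map (fun e => e.1) =
          (pref ++ e :: s).map (fun e => e.1) := by simp
      rw [this]; exact hnd
    have := ih (pref ++ [(e.1, pvU removed e.1 e.2)]) hnd2
    rw [hrw, this]
    simp

theorem pv_len_le (xs : List Int) :
    xs.Pairwise (· < ·) → ∀ a b : Int, (∀ x ∈ xs, a ≤ x ∧ x < b) → xs = [] ∨ (xs.length : Int) ≤ b - a := by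
  induction xs with
  | nil => intro _ a b _; exact Or.inl rfl
  | cons x t ih =>
    intro h a b hm
    right
    have hx := hm x (by simp)
    have ht : ∀ y ∈ t, x + 1 ≤ y ∧ y < b := fun y hy =>
      ⟨by have := (List.pairwise_cons.1 h).1 y hy; omega, (hm y (List.mem_cons_of_mem _ hy)).2⟩
    rcases ih (List.pairwise_cons.1 h).2 (x + 1) b ht with hnil | hlen
    · subst hnil; simp; omega
    · simp only [List.length_cons]
      push_cast at hlen ⊢
      omega

theorem pv_cnt_eq_vals (done : List (String × Int)) (q : Int) :
    pvCnt done q = (((done.map (fun y => y.2)).filter (fun v => v < q)).length : Int) := by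
  rw [pvCnt, List.filter_map, List.length_map]
  rfl

theorem pv_cnt_append (done : List (String × Int)) (x : String × Int) (q : Int) :
    pvCnt (done ++ [x]) q = pvCnt done q + (if x.2 < q then 1 else 0) := by
  rw [pvCnt, pvCnt, List.filter_append]
  by_cases h : x.2 < q <;> simp [h]

theorem pv_cnt_core (vs : List Int) (hp : vs.Pairwise (· < ·)) (rv p : Int)
    (hlt : ∀ v ∈ vs, v < rv) :
    ((p - ((vs.filter (fun v => v < p)).length : Int) > rv - ((vs.filter (fun v => v < rv)).length : Int)) ↔ rv < p) := by
  have hcv : vs.filter (fun v => v < rv) = vs := List.filter_eq_self.2 (fun v hv => by simpa using hlt v hv)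
  by_cases hrp : rv < p
  · have hcp : vs.filter (fun v => v < p) = vs := List.filter_eq_self.2 (fun v hv => by
      have := hlt v hv; simp; omega)
    rw [hcv, hcp]
    constructor <;> intro <;> omega
  · have hsplit := (List.length_eq_length_filter_add (l := vs) (fun v => decide (v < p))).symm
    have hrest := pv_len_le ((vs.filter (fun v => !(decide (v < p)))).map id)
      (by simpa using List.Pairwise.filter _ hp) p rv
      (fun x hx => by
        simp only [List.map_id] at hx
        have h1 := List.of_mem_filter hx
        have h2 := hlt x (List.mem_of_mem_filter hx)
        simp at h1
        exact ⟨by omega, h2⟩)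
    simp only [List.map_id] at hrest
    rw [hcv]
    have hle := List.length_filter_le (fun v => decide (v < p)) vs
    rcases hrest with hnil | hlen
    · have : (vs.filter (fun v => !(decide (v < p)))).length = 0 := by rw [hnil]; rfl
      constructor
      · intro hgt; omega
      · intro hgt; exact absurd hgt hrp
    · constructor
      · intro hgt
        exfalso
        omega
      · intro hgt; exact absurd hgt hrp

theorem pv_cnt_lt (done : List (String × Int)) (hp : (done.map (fun y => y.2)).Pairwise (· < ·))
    (rv p : Int) (hlt : ∀ y ∈ done, y.2 < rv) :
    ((p - pvCnt done p > rv - pvCnt done rv) ↔ rv < p) := by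
  rw [pv_cnt_eq_vals, pv_cnt_eq_vals]
  exact pv_cnt_core _ hp rv p (fun v hv => by
    rcases List.mem_map.1 hv with ⟨y, hy, rfl⟩
    exact hlt y hy)

theorem pv_find?_unique {ν : Type} (l : List (String × ν)) (e : String × ν)
    (hnd : (l.map (fun y => y.1)).Nodup) (he : e ∈ l) :
    List.find? (fun y => y.1 == e.1) l = some e := by
  induction l with
  | nil => simp at he
  | cons a t ih =>
    simp only [List.map_cons, List.nodup_cons] at hnd
    rcases List.mem_cons.1 he with rfl | ht
    · exact List.find?_cons_of_pos (p := fun y : String × ν => y.1 == e.1) (by simp)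
    · have hne : (a.1 == e.1) = false := by
        simp only [beq_eq_false_iff_ne, ne_eq]
        intro hae
        exact hnd.1 (by rw [hae]; exact List.mem_map_of_mem (f := fun y : String × ν => y.1) ht)
      rw [List.find?_cons_of_neg (p := fun y : String × ν => y.1 == e.1) (by simp [hne])]
      exact ih hnd.2 ht

theorem pv_insert_render (l : List (String × List (String × Int))) (done : List (String × Int))
    (k : String) (v : PySem.Dict String Int) (hk : k ∈ l.map (fun y => y.1)) :
    (pvRender l done).insert k v =
      PySem.Dict.mk (l.map (fun e => if e.1 = k then (e.1, v) else (e.1, pvE done e.1 e.2))) := by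
  have hc : (pvRender l done).contains k = true := by
    rw [pvRender, pv_contains_mk]
    rcases List.mem_map.1 hk with ⟨w, hw, rfl⟩
    exact List.any_eq_true.2 ⟨(w.1, pvE done w.1 w.2), List.mem_map_of_mem hw, by simp⟩
  cases hmk : pvRender l done with
  | mk items =>
    have hitems : items = l.map (fun e => (e.1, pvE done e.1 e.2)) := by
      have := congrArg PySem.Dict.items hmk
      exact this.symm
    rw [hmk] at hc
    apply PySem.Dict.ext
    rw [pv_items_insert_pos _ _ _ hc, hitems, List.map_map]
    apply List.map_congr_left
    intro e hel
    by_cases hek : e.1 = k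
    · simp [Function.comp, hek]
    · simp [Function.comp, hek]

theorem pvE_done_mem (done : List (String × Int)) (k : String) (d : List (String × Int))
    (h : k ∈ done.map (fun y => y.1)) :
    pvE done k d = PySem.Dict.mk (d.filter (fun x => x.1 ≠ pvPP)) := by
  rw [pvE, if_pos h]

theorem pvU_of_filtered (removed : Int) (kk : String) (d : List (String × Int)) :
    pvU removed kk (PySem.Dict.mk (d.filter (fun x => x.1 ≠ pvPP))) =
      PySem.Dict.mk (d.filter (fun x => x.1 ≠ pvPP)) := by
  rw [pvU]
  by_cases hcfg : kk = pvCV ∨ kk = pvCP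
  · rw [if_pos hcfg]
  · rw [if_neg hcfg, pv_get?_mk_filter_pp]

-- one step of A's outer loop, on a fresh removal (x.1 not yet removed)
theorem pv_step (l : List (String × List (String × Int)))
    (hnd : (l.map (fun e => e.1)).Nodup)
    (done : List (String × Int)) (x : String × Int)
    (hx1 : x.1 ∉ done.map (fun y => y.1))
    (hxnc : x.1 ≠ pvCV ∧ x.1 ≠ pvCP)
    (d0 : List (String × Int))
    (hfind : List.find? (fun e => e.1 == x.1) l = some (x.1, d0))
    (hpp : (PySem.Dict.mk d0).get? pvPP = some x.2)
    (hdonev : ∀ y ∈ done, y.2 < x.2)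
    (hdp : (done.map (fun y => y.2)).Pairwise (· < ·)) :
    pvStepA (pvRender l done) x = pvRender l (done ++ [x]) := by
  have hxkeys : x.1 ∈ l.map (fun y => y.1) := by
    have := List.mem_of_find?_eq_some hfind
    exact List.mem_map.2 ⟨(x.1, d0), this, rfl⟩
  have hget : (pvRender l done).get? x.1 = some (pvE done x.1 d0) := by
    rw [pv_get?_render, hfind]
    rfl
  have hEx : pvE done x.1 d0 = (PySem.Dict.mk d0).insert pvPP (x.2 - pvCnt done x.2) := by
    rw [pvE, if_neg hx1, if_neg (by tauto), hpp]
  have hscrut : (((pvRender l done).get? x.1).getD (PySem.Dict.mk [])).get? pvPP =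
      some (x.2 - pvCnt done x.2) := by
    rw [hget, Option.getD_some, hEx, pv_get?_insert_self]
  have hfilter : (((pvRender l done).get? x.1).getD (PySem.Dict.mk [])).items.filter (fun q => q.1 ≠ pvPP) =
      d0.filter (fun q => q.1 ≠ pvPP) := by
    rw [hget, Option.getD_some, hEx, pv_filter_items_insert]
  rw [pvStepA, hscrut]
  dsimp only
  rw [hfilter, pv_insert_render _ _ _ _ hxkeys]
  set r : Int := x.2 - pvCnt done x.2 with hr
  set G : (String × List (String × Int)) → PySem.Dict String Int := fun e =>
    if e.1 = x.1 then PySem.Dict.mk (d0.filter (fun q => q.1 ≠ pvPP)) else pvE done e.1 e.2 with hG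
  have hmapG : l.map (fun e => if e.1 = x.1 then (e.1, PySem.Dict.mk (d0.filter (fun q => q.1 ≠ pvPP)))
      else (e.1, pvE done e.1 e.2)) = l.map (fun e => (e.1, G e)) := by
    apply List.map_congr_left
    intro e _
    by_cases hek : e.1 = x.1 <;> simp [hG, hek]
  rw [hmapG]
  have hkeys : (PySem.Dict.mk (l.map (fun e => (e.1, G e)))).keys =
      (l.map (fun e => (e.1, G e))).map (fun q : String × PySem.Dict String Int => q.1) := rfl
  rw [hkeys]
  have hkeys2 : (l.map (fun e => (e.1, G e))).map (fun q : String × PySem.Dict String Int => q.1) = l.map (fun e => e.1) := by simp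
  have hnd2 : ((([] : List (String × PySem.Dict String Int)) ++ l.map (fun e => (e.1, G e))).map (fun q : String × PySem.Dict String Int => q.1)).Nodup := by
    simpa using hnd
  have hfold := pv_inner_fold r (l.map (fun e => (e.1, G e))) [] hnd2
  simp only [List.nil_append] at hfold
  rw [hfold, List.map_map, pvRender]
  congr 1
  apply List.map_congr_left
  intro e hel
  show (e.1, pvU r e.1 (G e)) = (e.1, pvE (done ++ [x]) e.1 e.2)
  congr 1
  have hdonekeys : (done ++ [x]).map (fun y => y.1) = done.map (fun y => y.1) ++ [x.1] := by simp
  by_cases hek : e.1 = x.1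
  · -- the entry just removed in this step
    have he2 : e = (x.1, d0) := by
      have h1 := pv_find?_unique l e hnd hel
      rw [hek, hfind] at h1
      exact (Option.some.inj h1).symm
    have hGe : G e = PySem.Dict.mk (d0.filter (fun q => q.1 ≠ pvPP)) := by
      rw [hG]; simp [hek]
    rw [hGe, pvU_of_filtered, pvE, if_pos (by rw [hdonekeys, hek]; exact List.mem_append_right _ (by simp))]
    rw [he2]
  · -- any other entry
    by_cases hmem : e.1 ∈ done.map (fun y => y.1)
    · have hGe : G e = pvE done e.1 e.2 := by rw [hG]; simp [hek]
      rw [hGe, pvE_done_mem _ _ _ hmem, pvU_of_filtered,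
        pvE_done_mem _ _ _ (by rw [hdonekeys]; exact List.mem_append_left _ hmem)]
    · have hGe : G e = pvE done e.1 e.2 := by rw [hG]; simp [hek]
      have hmem' : e.1 ∉ (done ++ [x]).map (fun y => y.1) := by
        rw [hdonekeys]
        intro hc
        rcases List.mem_append.1 hc with h | h
        · exact hmem h
        · exact hek (by simpa using h)
      rw [hGe]
      by_cases hcfg : e.1 = pvCV ∨ e.1 = pvCP
      · rw [pvE, if_neg hmem, if_pos hcfg, pvU, if_pos hcfg, pvE, if_neg hmem', if_pos hcfg]
      · rw [pvE, if_neg hmem, if_neg hcfg, pvE, if_neg hmem', if_neg hcfg]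
        cases hp : (PySem.Dict.mk e.2).get? pvPP with
        | none =>
          show pvU r e.1 (PySem.Dict.mk e.2) = PySem.Dict.mk e.2
          rw [pvU, if_neg hcfg, hp]
        | some p =>
          show pvU r e.1 ((PySem.Dict.mk e.2).insert pvPP (p - pvCnt done p)) =
            (PySem.Dict.mk e.2).insert pvPP (p - pvCnt (done ++ [x]) p)
          rw [pvU, if_neg hcfg, pv_get?_insert_self]
          show (if p - pvCnt done p > r then
              ((PySem.Dict.mk e.2).insert pvPP (p - pvCnt done p)).insert pvPP (p - pvCnt done p - 1)
            else (PySem.Dict.mk e.2).insert pvPP (p - pvCnt done p)) =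
            (PySem.Dict.mk e.2).insert pvPP (p - pvCnt (done ++ [x]) p)
          have hcond := pv_cnt_lt done hdp x.2 p hdonev
          by_cases hxp : x.2 < p
          · rw [if_pos (show p - pvCnt done p > r by rw [hr]; exact hcond.2 hxp), pv_insert_insert_same]
            congr 1
            rw [pv_cnt_append, if_pos hxp]
            omega
          · rw [if_neg (show ¬ p - pvCnt done p > r by rw [hr]; exact fun hgt => hxp (hcond.1 hgt))]
            congr 1
            rw [pv_cnt_append, if_neg hxp]
            omega

-- A's whole outer loop over the sorted with_priority list
theorem pv_fold_main (l : List (String × List (String × Int)))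
    (hnd : (l.map (fun e => e.1)).Nodup) :
    ∀ (wp done : List (String × Int)),
    (∀ x ∈ wp, (x.1 ≠ pvCV ∧ x.1 ≠ pvCP) ∧ ∃ d0,
        List.find? (fun e => e.1 == x.1) l = some (x.1, d0) ∧ (PySem.Dict.mk d0).get? pvPP = some x.2) →
    wp.Pairwise (fun a b => a.2 ≤ b.2) →
    (∀ x ∈ wp, ∀ y ∈ wp, x.1 ≠ y.1 → x.2 ≠ y.2) →
    (done.map (fun y => y.2)).Pairwise (· < ·) →
    (∀ x ∈ wp, ∀ y ∈ done, x.1 ≠ y.1 → y.2 < x.2) →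
    wp.foldl pvStepA (pvRender l done) = pvRender l (pvAccum done wp) := by
  intro wp
  induction wp with
  | nil => intro done _ _ _ _ _; rfl
  | cons x rest ih =>
    intro done hwp hsorted hdist hdp hge
    obtain ⟨hxnc, d0, hfind, hpp⟩ := hwp x (by simp)
    have hwp' := fun z hz => hwp z (List.mem_cons_of_mem _ hz)
    have hsorted' := (List.pairwise_cons.1 hsorted).2
    have hsortedx := (List.pairwise_cons.1 hsorted).1
    have hdist' := fun a ha b hb => hdist a (List.mem_cons_of_mem _ ha) b (List.mem_cons_of_mem _ hb)
    by_cases hmem : x.1 ∈ done.map (fun y => y.1)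
    · have hgetE : (pvRender l done).get? x.1 = some (pvE done x.1 d0) := by
        rw [pv_get?_render, hfind]; rfl
      have hscrut : (((pvRender l done).get? x.1).getD (PySem.Dict.mk [])).get? pvPP = none := by
        rw [hgetE, Option.getD_some, pvE_done_mem _ _ _ hmem, pv_get?_mk_filter_pp]
      have hnop : pvStepA (pvRender l done) x = pvRender l done := by
        rw [pvStepA, hscrut]
      have haccum : pvAccum done (x :: rest) = pvAccum done rest := by
        rw [pvAccum, List.foldl_cons, if_pos hmem]; rfl
      rw [List.foldl_cons, hnop, haccum]
      exact ih done hwp' hsorted' hdist' hdp (fun z hz => hge z (List.mem_cons_of_mem _ hz))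
    · have hdonev : ∀ y ∈ done, y.2 < x.2 := fun y hy => by
        by_cases hxy : x.1 = y.1
        · exact absurd (by rw [hxy]; exact List.mem_map_of_mem (f := fun y : String × Int => y.1) hy) hmem
        · exact hge x (by simp) y hy hxy
      rw [List.foldl_cons, pv_step l hnd done x hmem hxnc d0 hfind hpp hdonev hdp]
      have haccum : pvAccum done (x :: rest) = pvAccum (done ++ [x]) rest := by
        rw [pvAccum, List.foldl_cons, if_neg hmem]; rfl
      rw [haccum]
      apply ih (done ++ [x]) hwp' hsorted' hdist'
      · rw [List.map_append]
        rw [List.pairwise_append]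
        exact ⟨hdp, by simp, by
          intro a ha b hb
          simp only [List.map_cons, List.map_nil, List.mem_cons, List.not_mem_nil, or_false] at hb
          subst hb
          rcases List.mem_map.1 ha with ⟨y, hy, rfl⟩
          exact hdonev y hy⟩
      · intro z hz y hy hne
        rcases List.mem_append.1 hy with hyd | hyx
        · exact hge z (List.mem_cons_of_mem _ hz) y hyd hne
        · have hyx' : y = x := by simpa using hyx
          rw [hyx'] at hne ⊢
          have hle : x.2 ≤ z.2 := hsortedx z hz
          have hne2 : x.2 ≠ z.2 := hdist x (by simp) z (List.mem_cons_of_mem _ hz) hne.symm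
          omega

-- ---- accumulated-removals facts ----

theorem pv_accum_nil (done : List (String × Int)) : pvAccum done [] = done := rfl

theorem pv_accum_cons (done : List (String × Int)) (x : String × Int) (wp : List (String × Int)) :
    pvAccum done (x :: wp) =
      pvAccum (if x.1 ∈ done.map (fun y => y.1) then done else done ++ [x]) wp := by
  rw [pvAccum, List.foldl_cons]
  by_cases h : x.1 ∈ done.map (fun y => y.1) <;> simp [h, pvAccum]

theorem pv_accum_sub : ∀ (wp done : List (String × Int)), ∀ y ∈ pvAccum done wp, y ∈ done ∨ y ∈ wp := by
  intro wp
  induction wp with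
  | nil => intro done y hy; exact Or.inl hy
  | cons x rest ih =>
    intro done y hy
    rw [pv_accum_cons] at hy
    by_cases h : x.1 ∈ done.map (fun z => z.1)
    · rw [if_pos h] at hy
      rcases ih done y hy with h1 | h1
      · exact Or.inl h1
      · exact Or.inr (List.mem_cons_of_mem _ h1)
    · rw [if_neg h] at hy
      rcases ih (done ++ [x]) y hy with h1 | h1
      · rcases List.mem_append.1 h1 with h2 | h2
        · exact Or.inl h2
        · exact Or.inr (by simp at h2; simp [h2])
      · exact Or.inr (List.mem_cons_of_mem _ h1)

theorem pv_accum_keys : ∀ (wp done : List (String × Int)) (k : String),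
    (k ∈ (pvAccum done wp).map (fun y => y.1) ↔ k ∈ done.map (fun y => y.1) ∨ k ∈ wp.map (fun y => y.1)) := by
  intro wp
  induction wp with
  | nil => intro done k; simp [pv_accum_nil]
  | cons x rest ih =>
    intro done k
    rw [pv_accum_cons]
    by_cases h : x.1 ∈ done.map (fun z => z.1)
    · rw [if_pos h, ih]
      constructor
      · rintro (h1 | h1)
        · exact Or.inl h1
        · exact Or.inr (List.mem_map.2 (by rcases List.mem_map.1 h1 with ⟨y, hy, rfl⟩; exact ⟨y, List.mem_cons_of_mem _ hy, rfl⟩))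
      · rintro (h1 | h1)
        · exact Or.inl h1
        · rcases List.mem_map.1 h1 with ⟨y, hy, rfl⟩
          rcases List.mem_cons.1 hy with rfl | hy'
          · exact Or.inl h
          · exact Or.inr (List.mem_map_of_mem hy')
    · rw [if_neg h, ih]
      simp only [List.map_append, List.mem_append, List.map_cons, List.mem_cons]
      constructor
      · rintro (⟨h1 | h1⟩ | h1)
        · exact Or.inl h1
        · simp at h1; subst h1; exact Or.inr (Or.inl rfl)
        · exact Or.inr (Or.inr h1)
      · rintro (h1 | h1 | h1)
        · exact Or.inl (Or.inl h1)
        · subst h1; exact Or.inl (Or.inr (by simp))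
        · exact Or.inr h1

theorem pv_accum_nodup_keys : ∀ (wp done : List (String × Int)),
    (done.map (fun y => y.1)).Nodup → ((pvAccum done wp).map (fun y => y.1)).Nodup := by
  intro wp
  induction wp with
  | nil => intro done h; exact h
  | cons x rest ih =>
    intro done h
    rw [pv_accum_cons]
    by_cases hm : x.1 ∈ done.map (fun z => z.1)
    · rw [if_pos hm]; exact ih done h
    · rw [if_neg hm]
      exact ih (done ++ [x]) (by
        rw [List.map_append, List.nodup_append]
        exact ⟨h, by simp, by
          intro a ha b hb hab
          simp only [List.map_cons, List.map_nil, List.mem_cons, List.not_mem_nil, or_false] at hb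
          subst hab
          exact hm (hb ▸ ha)⟩)

-- ---- filterMap helpers ----

theorem pv_filterMap_inj {α β : Type} [DecidableEq β] : ∀ (l : List α) (f : α → Option β),
    l.Nodup → (l.filterMap f).Nodup →
    ∀ a ∈ l, ∀ b ∈ l, ∀ v, f a = some v → f b = some v → a = b := by
  intro l
  induction l with
  | nil => intro f _ _ a ha; simp at ha
  | cons x t ih =>
    intro f hnd hfm a ha b hb v hfa hfb
    rw [List.nodup_cons] at hnd
    rcases List.mem_cons.1 ha with rfl | ha' <;> rcases List.mem_cons.1 hb with rfl | hb'
    · rfl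
    · exfalso
      rw [List.filterMap_cons, hfa] at hfm
      rw [List.nodup_cons] at hfm
      exact hfm.1 (List.mem_filterMap.2 ⟨b, hb', hfb⟩)
    · exfalso
      rw [List.filterMap_cons, hfb] at hfm
      rw [List.nodup_cons] at hfm
      exact hfm.1 (List.mem_filterMap.2 ⟨a, ha', hfa⟩)
    · refine ih f hnd.2 ?_ a ha' b hb' v hfa hfb
      rw [List.filterMap_cons] at hfm
      cases hfx : f x with
      | none => rw [hfx] at hfm; exact hfm
      | some w => rw [hfx] at hfm; exact (List.nodup_cons.1 hfm).2

theorem pv_filterMap_filter_isSome {α β : Type} : ∀ (l : List α) (f : α → Option β),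
    l.filterMap f = (l.filter (fun a => (f a).isSome)).filterMap f := by
  intro l f
  induction l with
  | nil => rfl
  | cons x t ih =>
    rw [List.filterMap_cons, List.filter_cons]
    cases hfx : f x with
    | none => simp [ih]
    | some w => simp [hfx, ih]

theorem pv_map_snd_eq_filterMap {β : Type} (f : String → Option β) :
    ∀ (D : List (String × β)), (∀ y ∈ D, f y.1 = some y.2) →
    D.map (fun y => y.2) = (D.map (fun y => y.1)).filterMap f := by
  intro D
  induction D with
  | nil => intro _; rfl
  | cons y t ih =>
    intro h
    rw [List.map_cons, List.map_cons, List.filterMap_cons, h y (by simp),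
      ih (fun z hz => h z (List.mem_cons_of_mem _ hz))]

-- ---- bridges between the two ports' views of the input ----

-- lookup of the personal_priority of key k in the overlay dict
def pvGetPP (overlay : List (String × List (String × Int))) (k : String) : Option Int :=
  (((pvToDict overlay).get? k).getD (PySem.Dict.mk [])).get? pvPP

theorem pv_get?_toDict (overlay : List (String × List (String × Int))) (k : String) :
    (pvToDict overlay).get? k =
      (List.find? (fun e => e.1 == k) overlay).map (fun e => PySem.Dict.mk e.2) := by
  rw [pvToDict, pv_get?_mk, pv_find?_map_fst overlay (fun _ d => PySem.Dict.mk d) k, Option.map_map]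
  rfl

theorem pv_contains_toDict (overlay : List (String × List (String × Int))) (k : String) :
    (pvToDict overlay).contains k = (overlay.map (fun e => e.1)).contains k := by
  rw [pvToDict, pv_contains_mk]
  induction overlay with
  | nil => rfl
  | cons e t ih =>
    simp only [List.map_cons, List.any_cons, List.contains_cons, ih]
    by_cases h : e.1 = k
    · simp [h]
    · have h1 : (e.1 == k) = false := by simp [h]
      have h2 : (k == e.1) = false := by
        simp only [beq_eq_false_iff_ne, ne_eq]
        intro he
        exact h he.symm
      rw [h1, h2]

theorem pv_getPP_char (overlay : List (String × List (String × Int))) (k : String) (p : Int) :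
    pvGetPP overlay k = some p ↔
      ∃ d0, List.find? (fun e => e.1 == k) overlay = some (k, d0) ∧
        (PySem.Dict.mk d0).get? pvPP = some p := by
  rw [pvGetPP, pv_get?_toDict]
  cases hf : List.find? (fun e => e.1 == k) overlay with
  | none =>
    simp only [Option.map_none, Option.getD_none]
    constructor
    · intro h
      rw [pv_get?_mk] at h
      simp at h
    · rintro ⟨d0, hd0, _⟩
      simp at hd0
  | some w =>
    have hwk : w.1 = k := by
      have := List.find?_some hf
      simpa using this
    simp only [Option.map_some, Option.getD_some]
    constructor
    · intro h
      have hsome : (some w : Option (String × List (String × Int))) = some (k, w.2) := by rw [← hwk]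
      exact ⟨w.2, hsome, h⟩
    · rintro ⟨d0, hd0, hpp⟩
      have hw : w = (k, d0) := Option.some.inj hd0
      rw [hw]
      exact hpp

-- the function pvRemovedVals filters with is pvGetPP
theorem pv_removedVals_eq (overlay : List (String × List (String × Int))) (issue_ids : List String) :
    pvRemovedVals overlay issue_ids = (pvTargetList overlay issue_ids).filterMap (pvGetPP overlay) := by
  rw [pvRemovedVals]
  apply List.filterMap_congr
  intro k _
  rw [pvGetPP, pv_get?_toDict]
  cases hf : List.find? (fun e => e.1 == k) overlay with
  | none =>
    rfl
  | some w =>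
    simp only [Option.map_some, Option.getD_some]
    rw [pv_get?_mk]
    rfl

-- A's filtered key list is the stripped-and-hitting id list, wrapped in `some`
theorem pv_keysA_eq (overlay : List (String × List (String × Int))) (issue_ids : List String) :
    ((issue_ids.map pvOverlayKey).filter (fun k => match k with
      | none => false
      | some s => !(s == "") && (pvToDict overlay).contains s)) =
    ((issue_ids.map PySem.Str.strip).filter (fun k => !(k == "") && (pvToDict overlay).contains k)).map some := by
  induction issue_ids with
  | nil => rfl
  | cons i t ih =>
    simp only [List.map_cons, List.filter_cons]
    rw [pvOverlayKey]
    by_cases hs : PySem.Str.strip i = ""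
    · rw [if_pos hs]
      show ((List.filter _ (t.map pvOverlayKey))) = _
      rw [ih, hs]
      have : ((!(("" : String) == "")) && (pvToDict overlay).contains "") = false := by simp
      rw [this]
      simp
    · rw [if_neg hs]
      have hne : (!(PySem.Str.strip i == "")) = true := by simp [hs]
      by_cases hc : (pvToDict overlay).contains (PySem.Str.strip i) = true
      · have : ((!(PySem.Str.strip i == "")) && (pvToDict overlay).contains (PySem.Str.strip i)) = true := by
          rw [hne, hc]; rfl
        simp only [this, if_pos]
        rw [List.map_cons, ih]
      · have hcf : (pvToDict overlay).contains (PySem.Str.strip i) = false := by simpa using hc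
        have : ((!(PySem.Str.strip i == "")) && (pvToDict overlay).contains (PySem.Str.strip i)) = false := by
          rw [hcf]; simp
        simp only [this]
        simp only [Bool.false_eq_true, if_false]
        exact ih

-- the target list and B's set agree
theorem pv_targets_eq (overlay : List (String × List (String × Int))) (issue_ids : List String) :
    (issue_ids.foldl (fun t i =>
      let k := PySem.Str.strip i
      if !(k == "") && (pvToDict overlay).contains k then PySem.Set.add t k else t) PySem.Set.empty) =
    pvTargetList overlay issue_ids := by
  have hgen : ∀ (ids : List String) (acc : PySem.Set String),
      ids.foldl (fun t i =>
        let k := PySem.Str.strip i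
        if !(k == "") && (pvToDict overlay).contains k then PySem.Set.add t k else t) acc =
      ((ids.map PySem.Str.strip).filter (fun k => !(k == "") && (pvToDict overlay).contains k)).foldl PySem.Set.add acc := by
    intro ids
    induction ids with
    | nil => intro acc; rfl
    | cons i t ih =>
      intro acc
      simp only [List.foldl_cons, List.map_cons, List.filter_cons]
      by_cases hc : (!(PySem.Str.strip i == "") && (pvToDict overlay).contains (PySem.Str.strip i)) = true
      · rw [hc]
        simp only [if_pos, List.foldl_cons]
        rw [ih]
      · have hcf := hc
        simp only [Bool.not_eq_true] at hcf
        rw [hcf]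
        simp only [Bool.false_eq_true, if_false]
        rw [ih]
  rw [hgen issue_ids PySem.Set.empty, pvTargetList]
  have hcond : (fun k => !(k == "") && (pvToDict overlay).contains k) =
      (fun k => !(k == "") && (overlay.map (fun e => e.1)).contains k) := by
    funext k
    rw [pv_contains_toDict]
  rw [hcond]
  rfl

theorem pv_render_nil (l : List (String × List (String × Int)))
    (hinner : ∀ e ∈ l, (e.2.map (fun x => x.1)).Nodup) :
    pvRender l [] = pvToDict l := by
  rw [pvRender, pvToDict]
  congr 1
  apply List.map_congr_left
  intro e he
  congr 1
  rw [pvE, if_neg (by simp)]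
  by_cases hcfg : e.1 = pvCV ∨ e.1 = pvCP
  · rw [if_pos hcfg]
  · rw [if_neg hcfg]
    cases hp : (PySem.Dict.mk e.2).get? pvPP with
    | none => rfl
    | some p =>
      show (PySem.Dict.mk e.2).insert pvPP (p - pvCnt [] p) = PySem.Dict.mk e.2
      have h0 : pvCnt [] p = 0 := rfl
      rw [h0, sub_zero]
      exact pv_insert_mk_self e.2 p (hinner e he) hp

theorem pv_ofDict_toDict (l : List (String × List (String × Int))) :
    pvOfDict (pvToDict l) = l := by
  rw [pvOfDict, pvToDict]
  show (l.map _).map _ = l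
  rw [List.map_map]
  have : ((fun e : String × PySem.Dict String Int => (e.1, e.2.items)) ∘
      (fun e : String × List (String × Int) => (e.1, PySem.Dict.mk e.2))) = fun e => e := rfl
  rw [this]
  exact List.map_id' l

theorem pv_keyfun_eq :
    (fun x : String × Int => if x.2 = 0 then 0 else x.2) = (fun x : String × Int => x.2) := by
  funext x
  by_cases h : x.2 = 0
  · rw [if_pos h, h]
  · rw [if_neg h]

theorem pv_mem_wp0 (overlay : List (String × List (String × Int))) (T0 : List String) (x : String × Int) :
    x ∈ (T0.map some).filterMap (fun k => match k with
      | none => none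
      | some s => (pvGetPP overlay s).map (fun p => (s, p))) ↔
    x.1 ∈ T0 ∧ pvGetPP overlay x.1 = some x.2 := by
  rw [List.filterMap_map]
  constructor
  · intro h
    rcases List.mem_filterMap.1 h with ⟨s, hs, hfs⟩
    have hfs' : (pvGetPP overlay s).map (fun p => (s, p)) = some x := hfs
    cases hg : pvGetPP overlay s with
    | none => rw [hg] at hfs'; simp at hfs'
    | some p =>
      rw [hg] at hfs'
      have hx : (s, p) = x := by simpa using hfs'
      constructor
      · rw [← hx]; exact hs
      · rw [← hx]; exact hg
  · rintro ⟨h1, h2⟩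
    refine List.mem_filterMap.2 ⟨x.1, h1, ?_⟩
    show (pvGetPP overlay x.1).map (fun p => (x.1, p)) = some x
    rw [h2]
    rfl

theorem pv_filter_pp_of_none (d : List (String × Int))
    (h : (PySem.Dict.mk d).get? pvPP = none) :
    d.filter (fun x => x.1 ≠ pvPP) = d := by
  have hfind : List.find? (fun e => e.1 == pvPP) d = none := by
    rw [pv_get?_mk] at h
    cases hf : List.find? (fun e => e.1 == pvPP) d with
    | none => rfl
    | some w => rw [hf] at h; simp at h
  apply List.filter_eq_self.2
  intro x hx
  have := List.find?_eq_none.1 hfind x hx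
  simpa using this

theorem pv_set_contains_iff (L : List String) (k : String) :
    (PySem.Set.contains L k = true) ↔ k ∈ L := by
  rw [PySem.Set.contains]
  simp

-- the two ports agree under the precondition
theorem pv_main (overlay : List (String × List (String × Int))) (issue_ids : List String)
    (hnd : (overlay.map (fun e => e.1)).Nodup)
    (hinner : ∀ e ∈ overlay, (e.2.map (fun x => x.1)).Nodup)
    (hcv : pvCV ∉ pvTargetList overlay issue_ids)
    (hcp : pvCP ∉ pvTargetList overlay issue_ids)
    (hvals : (pvRemovedVals overlay issue_ids).Nodup) :
    rebalance_overlay_after_remove_multiple overlay issue_ids =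
      rebalance_overlay_after_remove_multiple_alt overlay issue_ids := by
  rw [rebalance_overlay_after_remove_multiple, rebalance_overlay_after_remove_multiple_alt]
  dsimp only
  rw [pv_keysA_eq, pv_targets_eq, pv_keyfun_eq]
  set TL := pvTargetList overlay issue_ids with hTLdef
  set T0 : List String := (issue_ids.map PySem.Str.strip).filter
    (fun k => !(k == "") && (pvToDict overlay).contains k) with hT0
  have hTL : TL = PySem.List.dedup T0 := by
    rw [hTLdef, pvTargetList]
    have hcond : (fun k => !(k == "") && (overlay.map (fun e => e.1)).contains k) =
        (fun k => !(k == "") && (pvToDict overlay).contains k) := by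
      funext k
      rw [pv_contains_toDict]
    rw [hcond]
  have hTLmem : ∀ s, s ∈ T0 ↔ s ∈ TL := fun s => by
    rw [hTL]
    exact (PySem.List.mem_dedup _ _).symm
  have hTLnodup : TL.Nodup := by rw [hTL]; exact PySem.List.nodup_dedup _
  have hvals' : (TL.filterMap (pvGetPP overlay)).Nodup := by
    rw [← pv_removedVals_eq]
    exact hvals
  by_cases hT : T0 = []
  · -- no key hits the overlay: both sides return the overlay unchanged
    rw [if_pos (by rw [hT]; rfl), pv_ofDict_toDict]
    have hTLnil : TL = [] := by rw [hTL, hT]; rfl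
    rw [hTLnil]
    have hmap : overlay.map (fun e =>
        if PySem.Set.contains ([] : List String) e.1 then (e.1, e.2.filter (fun x => x.1 ≠ pvPP))
        else if e.1 = pvCV ∨ e.1 = pvCP then e
        else match (PySem.Dict.mk e.2).get? pvPP with
          | none => e
          | some p => (e.1, ((PySem.Dict.mk e.2).insert pvPP
              (p - pvCountLt (PySem.List.sorted (([] : List String).filterMap
                (fun k => (((pvToDict overlay).get? k).getD (PySem.Dict.mk [])).get? pvPP)) (fun v => v)) p)).items)) = overlay := by
      have h1 : ∀ e ∈ overlay, (if PySem.Set.contains ([] : List String) e.1 then (e.1, e.2.filter (fun x => x.1 ≠ pvPP))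
          else if e.1 = pvCV ∨ e.1 = pvCP then e
          else match (PySem.Dict.mk e.2).get? pvPP with
            | none => e
            | some p => (e.1, ((PySem.Dict.mk e.2).insert pvPP
                (p - pvCountLt (PySem.List.sorted (([] : List String).filterMap
                  (fun k => (((pvToDict overlay).get? k).getD (PySem.Dict.mk [])).get? pvPP)) (fun v => v)) p)).items)) = e := by
        intro e he
        rw [if_neg (by simp [PySem.Set.contains])]
        by_cases hcfg : e.1 = pvCV ∨ e.1 = pvCP
        · rw [if_pos hcfg]
        · rw [if_neg hcfg]
          cases hp : (PySem.Dict.mk e.2).get? pvPP with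
          | none => rfl
          | some p =>
            show (e.1, ((PySem.Dict.mk e.2).insert pvPP (p - pvCountLt _ p)).items) = e
            have hc0 : pvCountLt (PySem.List.sorted (([] : List String).filterMap
                (fun k => (((pvToDict overlay).get? k).getD (PySem.Dict.mk [])).get? pvPP)) (fun v => v)) p = 0 := rfl
            rw [hc0, sub_zero, pv_insert_mk_self e.2 p (hinner e he) hp]
      calc overlay.map _ = overlay.map (fun e => e) := List.map_congr_left h1
        _ = overlay := List.map_id' overlay
    rw [hmap]
  · rw [if_neg (by
      intro hmapnil
      exact hT (by simpa using hmapnil))]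
    have hfun : (fun k => (((pvToDict overlay).get? k).getD (PySem.Dict.mk [])).get? pvPP) =
        pvGetPP overlay := rfl
    have hfun2 : (fun k : Option String => match k with
        | none => none
        | some s => Option.map (fun p => (s, p)) ((((pvToDict overlay).get? s).getD (PySem.Dict.mk [])).get? pvPP)) =
      (fun k : Option String => match k with
        | none => none
        | some s => Option.map (fun p => (s, p)) (pvGetPP overlay s)) := rfl
    rw [hfun, hfun2]
    set wp := PySem.List.sorted ((T0.map some).filterMap (fun k => match k with
      | none => none
      | some s => Option.map (fun p => (s, p)) (pvGetPP overlay s))) (fun x : String × Int => x.2) with hwpdef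
    have hmemwp : ∀ x : String × Int, x ∈ wp ↔ x.1 ∈ T0 ∧ pvGetPP overlay x.1 = some x.2 := by
      intro x
      rw [hwpdef]
      exact (PySem.List.mem_sorted _ _ _ x).trans (pv_mem_wp0 overlay T0 x)
    have hwp : ∀ x ∈ wp, (x.1 ≠ pvCV ∧ x.1 ≠ pvCP) ∧ ∃ d0,
        List.find? (fun e => e.1 == x.1) overlay = some (x.1, d0) ∧
          (PySem.Dict.mk d0).get? pvPP = some x.2 := by
      intro x hx
      obtain ⟨hxT, hxg⟩ := (hmemwp x).1 hx
      have hxTL := (hTLmem x.1).1 hxT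
      exact ⟨⟨fun h => hcv (h ▸ hxTL), fun h => hcp (h ▸ hxTL)⟩,
        (pv_getPP_char overlay x.1 x.2).1 hxg⟩
    have hsorted : wp.Pairwise (fun a b => a.2 ≤ b.2) := by
      rw [hwpdef]
      exact PySem.List.sorted_pairwise _ _
    have hdist : ∀ x ∈ wp, ∀ y ∈ wp, x.1 ≠ y.1 → x.2 ≠ y.2 := by
      intro x hx y hy hne heq
      obtain ⟨hxT, hxg⟩ := (hmemwp x).1 hx
      obtain ⟨hyT, hyg⟩ := (hmemwp y).1 hy
      exact hne (pv_filterMap_inj TL (pvGetPP overlay) hTLnodup hvals' x.1 ((hTLmem _).1 hxT)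
        y.1 ((hTLmem _).1 hyT) x.2 hxg (by rw [hyg, heq]))
    have hfold := pv_fold_main overlay hnd wp [] hwp hsorted hdist (by simp)
      (by intro x _ y hy; simp at hy)
    conv_lhs => rw [← pv_render_nil overlay hinner]
    rw [hfold]
    set D := pvAccum [] wp with hDdef
    have hDsub : ∀ y ∈ D, y ∈ wp := by
      intro y hy
      rcases pv_accum_sub wp [] y hy with h | h
      · simp at h
      · exact h
    have hDkeys : ∀ k, (k ∈ D.map (fun y => y.1)) ↔ k ∈ wp.map (fun y => y.1) := by
      intro k
      rw [hDdef, pv_accum_keys]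
      simp
    have hwpkeys : ∀ k, k ∈ wp.map (fun y => y.1) ↔ (k ∈ T0 ∧ (pvGetPP overlay k).isSome = true) := by
      intro k
      constructor
      · intro h
        rcases List.mem_map.1 h with ⟨y, hy, rfl⟩
        obtain ⟨h1, h2⟩ := (hmemwp y).1 hy
        exact ⟨h1, by rw [h2]; rfl⟩
      · rintro ⟨h1, h2⟩
        cases hg : pvGetPP overlay k with
        | none => rw [hg] at h2; simp at h2
        | some p => exact List.mem_map.2 ⟨(k, p), (hmemwp (k, p)).2 ⟨h1, hg⟩, rfl⟩
    have hDnodup : (D.map (fun y => y.1)).Nodup := by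
      rw [hDdef]
      exact pv_accum_nodup_keys wp [] (by simp)
    have hcount : ∀ p : Int,
        pvCountLt (PySem.List.sorted (TL.filterMap (pvGetPP overlay)) (fun v => v)) p = pvCnt D p := by
      intro p
      have hperm1 := PySem.List.sorted_perm (TL.filterMap (pvGetPP overlay)) (fun v : Int => v) false
      have hfm : TL.filterMap (pvGetPP overlay) =
          (TL.filter (fun k => (pvGetPP overlay k).isSome)).filterMap (pvGetPP overlay) :=
        pv_filterMap_filter_isSome TL _
      have hpermkeys : (TL.filter (fun k => (pvGetPP overlay k).isSome)).Perm (D.map (fun y => y.1)) := by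
        rw [List.perm_ext_iff_of_nodup (hTLnodup.filter _) hDnodup]
        intro k
        rw [List.mem_filter]
        constructor
        · rintro ⟨h1, h2⟩
          exact (hDkeys k).2 ((hwpkeys k).2 ⟨(hTLmem k).2 h1, by simpa using h2⟩)
        · intro h
          obtain ⟨h1, h2⟩ := (hwpkeys k).1 ((hDkeys k).1 h)
          exact ⟨(hTLmem k).1 h1, by simpa using h2⟩
      have hval : (D.map (fun y => y.1)).filterMap (pvGetPP overlay) = D.map (fun y => y.2) :=
        (pv_map_snd_eq_filterMap (pvGetPP overlay) D (fun y hy => ((hmemwp y).1 (hDsub y hy)).2)).symm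
      have hlen : ((PySem.List.sorted (TL.filterMap (pvGetPP overlay)) (fun v : Int => v)).filter
            (fun v => v < p)).length = ((D.map (fun y => y.2)).filter (fun v => v < p)).length := by
        rw [← List.countP_eq_length_filter, ← List.countP_eq_length_filter]
        calc List.countP (fun v => decide (v < p)) (PySem.List.sorted (TL.filterMap (pvGetPP overlay)) (fun v : Int => v))
            = List.countP (fun v => decide (v < p)) (TL.filterMap (pvGetPP overlay)) := hperm1.countP_eq _
          _ = List.countP (fun v => decide (v < p)) ((TL.filter (fun k => (pvGetPP overlay k).isSome)).filterMap (pvGetPP overlay)) := by rw [← hfm]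
          _ = List.countP (fun v => decide (v < p)) ((D.map (fun y => y.1)).filterMap (pvGetPP overlay)) := (hpermkeys.filterMap _).countP_eq _
          _ = List.countP (fun v => decide (v < p)) (D.map (fun y => y.2)) := by rw [hval]
      rw [pvCountLt, pv_cnt_eq_vals, hlen]
    -- now compare pointwise
    rw [pvOfDict, pvRender]
    show ((overlay.map (fun e => (e.1, pvE D e.1 e.2))).map (fun q => (q.1, q.2.items))) = _
    rw [List.map_map]
    apply List.map_congr_left
    intro e he
    have hfe := pv_find?_unique overlay e hnd he
    have hppe : pvGetPP overlay e.1 = (PySem.Dict.mk e.2).get? pvPP := by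
      rw [pvGetPP, pv_get?_toDict, hfe]
      rfl
    show (e.1, (pvE D e.1 e.2).items) = _
    by_cases hmemT : e.1 ∈ TL
    · rw [if_pos ((pv_set_contains_iff TL e.1).2 hmemT)]
      by_cases hmemD : e.1 ∈ D.map (fun y => y.1)
      · rw [pvE_done_mem _ _ _ hmemD]
      · have hng : (PySem.Dict.mk e.2).get? pvPP = none := by
          cases hg : pvGetPP overlay e.1 with
          | none => rw [← hppe]; exact hg
          | some p => exact absurd ((hDkeys e.1).2 ((hwpkeys e.1).2
              ⟨(hTLmem e.1).2 hmemT, by rw [hg]; rfl⟩)) hmemD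
        rw [pvE, if_neg hmemD,
          if_neg (show ¬ (e.1 = pvCV ∨ e.1 = pvCP) by
            rintro (h | h)
            · exact hcv (h ▸ hmemT)
            · exact hcp (h ▸ hmemT)), hng, pv_filter_pp_of_none e.2 hng]
    · rw [if_neg (by rw [pv_set_contains_iff]; exact hmemT)]
      have hmemD : e.1 ∉ D.map (fun y => y.1) := fun h =>
        hmemT ((hTLmem e.1).1 ((hwpkeys e.1).1 ((hDkeys e.1).1 h)).1)
      by_cases hcfg : e.1 = pvCV ∨ e.1 = pvCP
      · rw [if_pos hcfg, pvE, if_neg hmemD, if_pos hcfg]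
      · rw [if_neg hcfg, pvE, if_neg hmemD, if_neg hcfg]
        cases hp : (PySem.Dict.mk e.2).get? pvPP with
        | none => rfl
        | some p =>
          show (e.1, ((PySem.Dict.mk e.2).insert pvPP (p - pvCnt D p)).items) =
            (e.1, ((PySem.Dict.mk e.2).insert pvPP
              (p - pvCountLt (PySem.List.sorted (TL.filterMap (pvGetPP overlay)) (fun v => v)) p)).items)
          rw [hcount p]

-- ===== VERDICT (by name: the statement is the Claim_ definition above) =====
theorem rebalance_overlay_after_remove_multiple_spec : Claim_equal_rebalance_overlay_after_remove_multiple := by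
  intro overlay issue_ids _ hpre
  obtain ⟨h1, h2, h3, h4, h5⟩ := hpre
  exact pv_main overlay issue_ids h1 h2 h3 h4 h5
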